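-- pv_equiv track=rewrite | github.com/daniel-reich/ubiquitous-fiesta | 9Px2rkc9TPhK54wDb_20.py | ecg_seq_index
-- ===== SOURCE A (Python) =====
-- def ecg_seq_index(n):
--   seq,rem = [1,2],[]
--   i = 3
--   while seq[-1] != n:
--     br = False
--     for k in rem:
--       if not coprime(k,seq[-1]):
--         seq.append(k)
--         rem.remove(k)
--         br = True
--         break
--     if not br:
--       while coprime(i,seq[-1]):
--         rem.append(i)
--         i += 1
--       seq.append(i)
--       i += 1
--   return len(seq)-1
--
-- def coprime(a,b):
--   while b:
--     a,b = b,a%b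
--   return a == 1
-- ===== SOURCE B (Python) =====
-- def ecg_seq_index(n):
--     # One used-set + repeated ascending scan replaces A's rem-buffer bookkeeping.
--     def _gcd(a, b):
--         while b:
--             a, b = b, a % b
--         return a
--     used = {1, 2}
--     last = 2
--     idx = 1
--     while last != n:
--         m = 2
--         while m in used or _gcd(m, last) == 1:
--             m += 1
--         used.add(m)
--         last = m
--         idx += 1
--     return idx
-- ===== Notes on version B (the rewrite author's own statement) =====
-- stated objective: simpler
-- what changed: A maintains a sorted buffer 'rem' of skipped candidates plus an advancing frontier pointer i, with a two-phase search (scan rem, else extend rem while coprime); B drops that machinery entirely and keeps only a used-set and the last term, finding each next term by one ascending scan for the smallest unused integer sharing a factor with the last term.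
import Mathlib
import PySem

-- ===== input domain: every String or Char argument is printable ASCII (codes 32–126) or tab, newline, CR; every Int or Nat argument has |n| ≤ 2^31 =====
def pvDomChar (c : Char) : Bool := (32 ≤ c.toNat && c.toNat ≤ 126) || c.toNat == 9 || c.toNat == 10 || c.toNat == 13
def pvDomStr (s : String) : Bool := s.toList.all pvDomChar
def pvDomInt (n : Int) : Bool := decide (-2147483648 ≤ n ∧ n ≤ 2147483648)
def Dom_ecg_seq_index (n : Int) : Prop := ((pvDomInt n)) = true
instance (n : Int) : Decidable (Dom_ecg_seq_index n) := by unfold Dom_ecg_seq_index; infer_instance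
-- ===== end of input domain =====

-- B replaces A's rem-buffer + frontier-pointer two-phase search by a single used-set
-- with a repeated ascending scan for the next term (objective: simpler, not faster).
-- On inputs the sequence never reaches, both Python loops diverge; both ports use the
-- same step fuel and the same exhaustion value, so they agree on every input.

-- ===== PORT A =====
-- Euclid's loop `while b: a, b = b, a % b` (shared helper; Source B's _gcd is the same loop)
def pyEuclid (a b : Int) : Int :=
  if _h : b = 0 then a else pyEuclid b (PySem.Int.mod a b)
termination_by b.natAbs
decreasing_by
  rcases lt_or_gt_of_ne _h with hb | hb
  · have h1 := (PySem.Int.mod_neg_bounds a hb).1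
    have h2 := (PySem.Int.mod_neg_bounds a hb).2
    omega
  · have h1 := PySem.Int.mod_nonneg a hb
    have h2 := PySem.Int.mod_lt a hb
    omega

def coprime (a b : Int) : Bool := pyEuclid a b == 1

-- `for k in rem: if not coprime(k, seq[-1]): seq.append(k); rem.remove(k); break`
def scanA (last : Int) : List Int → Option (Int × List Int)
  | [] => none
  | k :: rest =>
    if ¬ coprime k last then some (k, rest)
    else match scanA last rest with
      | some (x, r) => some (x, k :: r)
      | none => none

-- `while coprime(i, seq[-1]): rem.append(i); i += 1` (fuel only makes the loop total)
def extendA (last : Int) : List Int → Int → Nat → List Int × Int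
  | rem, i, 0 => (rem, i)
  | rem, i, f + 1 =>
    if coprime i last then extendA last (rem ++ [i]) (i + 1) f else (rem, i)

def loopA (n : Int) : List Int → List Int → Int → Nat → Int
  | _, _, _, 0 => -1
  | seq, rem, i, f + 1 =>
    if seq.getLastD 0 ≠ n then
      match scanA (seq.getLastD 0) rem with
      | some (k, rem') => loopA n (seq ++ [k]) rem' i f
      | none =>
        let p := extendA (seq.getLastD 0) rem i ((seq.getLastD 0).natAbs + 1)
        loopA n (seq ++ [p.2]) p.1 (p.2 + 1) f
    else (seq.length : Int) - 1

def ecg_seq_index (n : Int) : Int := loopA n [1, 2] [] 3 4294967296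

-- ===== PORT B =====
-- `m = 2; while m in used or _gcd(m, last) == 1: m += 1` (fuel only makes the loop total)
def scanB (used : PySem.Set Int) (last : Int) : Int → Nat → Int
  | m, 0 => m
  | m, f + 1 =>
    if PySem.Set.contains used m || (pyEuclid m last == 1) then scanB used last (m + 1) f
    else m

def loopB (n : Int) : Int → Int → PySem.Set Int → Nat → Int
  | _, _, _, 0 => -1
  | last, idx, used, f + 1 =>
    if last ≠ n then
      let m := scanB used last 2 ((last * (PySem.Set.len used + 1)).natAbs)
      loopB n m (idx + 1) (PySem.Set.add used m) f
    else idx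

def ecg_seq_index_alt (n : Int) : Int := loopB n 2 1 (PySem.Set.ofList [1, 2]) 4294967296

-- ===== PRECONDITION & SPEC =====
def Spec_ecg_seq_index (n : Int) (out : Int) : Prop := out = ecg_seq_index_alt n
instance (n : Int) (out : Int) : Decidable (Spec_ecg_seq_index n out) := by unfold Spec_ecg_seq_index; infer_instance

-- ===== CLAIM (what is proved, stated in full; the proofs are below) =====
def Claim_equal_ecg_seq_index : Prop := ∀ (n : Int), Dom_ecg_seq_index n → Spec_ecg_seq_index n (ecg_seq_index n)

-- ===== LEMMAS AND PROOFS =====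

-- the A-side loop invariant
def InvA (seq rem : List Int) (i : Int) : Prop :=
  3 ≤ i ∧ 2 ≤ seq.getLastD 0 ∧ (1 : Int) ∈ seq ∧ (2 : Int) ∈ seq ∧
  (∀ m ∈ seq, m < i) ∧
  (∀ m ∈ rem, 3 ≤ m ∧ m < i ∧ m ∉ seq) ∧
  (∀ m : Int, 3 ≤ m → m < i → m ∉ seq → m ∈ rem) ∧
  rem.Pairwise (· < ·)

-- t is the next EKG term after `last`, given the set `seq` of used values
def IsNext (seq : List Int) (last t : Int) : Prop :=
  2 ≤ t ∧ t ∉ seq ∧ Int.gcd t last ≠ 1 ∧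
  ∀ m : Int, 2 ≤ m → m < t → (m ∈ seq ∨ Int.gcd m last = 1)

-- the lockstep relation between the two loop states
def RelAB (seq rem : List Int) (i last idx : Int) (used : List Int) : Prop :=
  InvA seq rem i ∧ seq.getLastD 0 = last ∧ (seq.length : Int) = idx + 1 ∧
  used.Nodup ∧ (∀ m : Int, m ∈ used ↔ m ∈ seq)

theorem pyEuclid_eq_gcd : ∀ (k : Nat) (b : Int), b.natAbs = k → 0 ≤ b → ∀ a : Int, 0 ≤ a →
    pyEuclid a b = (Int.gcd a b : Int) := by
  intro k
  induction k using Nat.strong_induction_on with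
  | _ k ih =>
    intro b hk hb a ha
    rw [pyEuclid]
    split
    · next h => subst h; simp [Int.gcd, Int.natAbs_of_nonneg ha]
    · next h =>
      have hbpos : 0 < b := lt_of_le_of_ne hb (Ne.symm h)
      have hm1 := PySem.Int.mod_nonneg a hbpos
      have hm2 := PySem.Int.mod_lt a hbpos
      rw [ih (PySem.Int.mod a b).natAbs (by omega) _ rfl hm1 b hb]
      norm_cast
      rw [PySem.Int.mod_eq_emod_of_pos hbpos, Int.emod_def, mul_comm b (a / b)]
      rw [Int.gcd_comm a b]
      exact Int.gcd_sub_mul_right_right b a (a / b)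

theorem coprime_iff_gcd (a b : Int) (ha : 0 ≤ a) (hb : 0 ≤ b) :
    coprime a b = true ↔ Int.gcd a b = 1 := by
  rw [coprime, pyEuclid_eq_gcd b.natAbs b rfl hb a ha]
  simp

theorem scanA_eq_some {last : Int} : ∀ {rem : List Int} {k : Int} {rem' : List Int},
    scanA last rem = some (k, rem') →
    ∃ pre post, rem = pre ++ k :: post ∧ rem' = pre ++ post ∧
      (∀ j ∈ pre, coprime j last = true) ∧ coprime k last = false := by
  intro rem
  induction rem with
  | nil => intro k rem' h; simp [scanA] at h
  | cons x rest ih =>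
    intro k rem' h
    rw [scanA] at h
    split at h
    · next hc =>
      obtain ⟨rfl, rfl⟩ : x = k ∧ rest = rem' := by
        have := Option.some.inj h
        exact ⟨congrArg Prod.fst this, congrArg Prod.snd this⟩
      exact ⟨[], rest, by simp, by simp, by simp, by simpa using hc⟩
    · next hc =>
      cases hs : scanA last rest with
      | none => rw [hs] at h; cases h
      | some p =>
        obtain ⟨x', r⟩ := p
        rw [hs] at h
        obtain ⟨rfl, rfl⟩ : x' = k ∧ x :: r = rem' := by
          have := Option.some.inj h
          exact ⟨congrArg Prod.fst this, congrArg Prod.snd this⟩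
        obtain ⟨pre, post, hr, hr', hpre, hk⟩ := ih hs
        exact ⟨x :: pre, post, by simp [hr], by simp [hr'],
          by intro j hj; rcases List.mem_cons.mp hj with rfl | hj
             · simpa using hc
             · exact hpre j hj, hk⟩

theorem scanA_eq_none {last : Int} : ∀ {rem : List Int},
    scanA last rem = none → ∀ j ∈ rem, coprime j last = true := by
  intro rem
  induction rem with
  | nil => intro _ j hj; simp at hj
  | cons x rest ih =>
    intro h j hj
    rw [scanA] at h
    split at h
    · cases h
    · next hc =>
      cases hs : scanA last rest with
      | none =>
        rcases List.mem_cons.mp hj with rfl | hj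
        · simpa using hc
        · exact ih hs j hj
      | some p => rw [hs] at h; obtain ⟨a, b⟩ := p; cases h

theorem extendA_spec {last j : Int} : ∀ (f : Nat) (i : Int) (rem : List Int),
    i ≤ j → (∀ t : Int, i ≤ t → t < j → coprime t last = true) →
    coprime j last = false → (j - i).toNat < f →
    ∃ L : List Int, extendA last rem i f = (rem ++ L, j) ∧
      (∀ m : Int, m ∈ L ↔ i ≤ m ∧ m < j) ∧ L.Pairwise (· < ·) := by
  intro f
  induction f with
  | zero => intro i rem _ _ _ hf; omega
  | succ f ih =>
    intro i rem hij hcop hj hf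
    rw [extendA]
    rcases eq_or_lt_of_le hij with rfl | hlt
    · rw [hj]
      refine ⟨[], by simp, ?_, by simp⟩
      intro m; simp
    · rw [if_pos (hcop i le_rfl hlt)]
      obtain ⟨L, he, hm, hp⟩ := ih (i + 1) (rem ++ [i]) (by omega)
        (fun t ht1 ht2 => hcop t (by omega) ht2) hj (by omega)
      refine ⟨i :: L, ?_, ?_, ?_⟩
      · rw [he]; simp
      · intro m
        rw [List.mem_cons, hm]
        constructor
        · rintro (rfl | ⟨h1, h2⟩) <;> omega
        · intro ⟨h1, h2⟩
          rcases eq_or_lt_of_le h1 with rfl | h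
          · exact Or.inl rfl
          · exact Or.inr ⟨by omega, h2⟩
      · exact List.Pairwise.cons (fun m hmL => by have := (hm m).mp hmL; omega) hp

theorem dvd_gcd_ne_one {last x : Int} (hl : 2 ≤ last) (hd : last ∣ x) : Int.gcd x last ≠ 1 := by
  intro h
  have hc : (last.toNat : Int) = last := Int.toNat_of_nonneg (by omega)
  have h2 : last.toNat ∣ Int.gcd x last := Int.dvd_gcd (by rw [hc]; exact hd) (by rw [hc])
  rw [h] at h2
  have := Nat.le_of_dvd one_pos h2
  omega

theorem exists_first_noncoprime (last i : Int) (hl : 2 ≤ last) :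
    ∃ j : Int, i ≤ j ∧ j ≤ i + last - 1 ∧ Int.gcd j last ≠ 1 ∧
      ∀ t : Int, i ≤ t → t < j → Int.gcd t last = 1 := by
  have hlast0 : last ≠ 0 := by omega
  have hr1 : 0 ≤ (last - i % last) % last := Int.emod_nonneg _ hlast0
  have hr2 : (last - i % last) % last < last := Int.emod_lt_of_pos _ (by omega)
  have hdvd : last ∣ (i + (last - i % last) % last) := by
    refine ⟨1 + i / last - ((last - i % last) / last), ?_⟩
    rw [Int.emod_def (last - i % last) last, Int.emod_def i last]
    ring
  have hex : ∃ d : Nat, Int.gcd (i + (d : Int)) last ≠ 1 :=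
    ⟨((last - i % last) % last).toNat, by
      rw [Int.toNat_of_nonneg hr1]; exact dvd_gcd_ne_one hl hdvd⟩
  refine ⟨i + (Nat.find hex : Int), by omega, ?_, Nat.find_spec hex, ?_⟩
  · have := Nat.find_min' hex (m := ((last - i % last) % last).toNat)
      (by rw [Int.toNat_of_nonneg hr1]; exact dvd_gcd_ne_one hl hdvd)
    omega
  · intro t ht1 ht2
    have hd : (t - i).toNat < Nat.find hex := by omega
    have := Nat.find_min hex hd
    simpa [Int.toNat_of_nonneg (by omega : (0:Int) ≤ t - i),
      show i + (t - i) = t by ring] using this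

theorem exists_unused_multiple (used : List Int) (hn : used.Nodup) (last : Int) (hl : 2 ≤ last) :
    ∃ x : Int, 2 ≤ x ∧ x ≤ last * ((used.length : Int) + 1) ∧ x ∉ used ∧ Int.gcd x last ≠ 1 := by
  have hinj : Function.Injective (fun c : Int => last * c) :=
    fun a b h => by simpa using mul_left_cancel₀ (by omega : last ≠ 0) h
  set T : Finset Int := (Finset.Icc (1 : Int) ((used.length : Int) + 1)).image (fun c => last * c) with hT
  have hcardT : T.card = used.length + 1 := by
    rw [hT, Finset.card_image_of_injective _ hinj, Int.card_Icc]
    omega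
  have hcardS : used.toFinset.card = used.length := List.toFinset_card_of_nodup hn
  have hex : ∃ x ∈ T, x ∉ used.toFinset := by
    by_contra hcon
    push Not at hcon
    have hsub : T ⊆ used.toFinset := fun x hx => hcon x hx
    have := Finset.card_le_card hsub
    omega
  obtain ⟨x, hxT, hxS⟩ := hex
  rw [hT] at hxT
  simp only [Finset.mem_image, Finset.mem_Icc] at hxT
  obtain ⟨c, ⟨hc1, hc2⟩, rfl⟩ := hxT
  refine ⟨last * c, ?_, ?_, by simpa using hxS, dvd_gcd_ne_one hl ⟨c, rfl⟩⟩
  · nlinarith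
  · nlinarith

theorem scanB_eq (used : PySem.Set Int) (last : Int) : ∀ (f : Nat) (m t : Int),
    m ≤ t →
    (∀ j : Int, m ≤ j → j < t → (PySem.Set.contains used j || (pyEuclid j last == 1)) = true) →
    (PySem.Set.contains used t || (pyEuclid t last == 1)) = false →
    (t - m).toNat < f → scanB used last m f = t := by
  intro f
  induction f with
  | zero => intro m t _ _ _ h; omega
  | succ f ih =>
    intro m t hmt hskip hstop hf
    rw [scanB]
    rcases eq_or_lt_of_le hmt with rfl | hlt
    · rw [hstop]; simp
    · rw [if_pos (hskip m le_rfl hlt)]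
      exact ih (m + 1) t (by omega) (fun j h1 h2 => hskip j (by omega) h2) hstop (by omega)

theorem stepFound {seq rem : List Int} {i k : Int} {rem' : List Int}
    (hinv : InvA seq rem i) (hs : scanA (seq.getLastD 0) rem = some (k, rem')) :
    IsNext seq (seq.getLastD 0) k ∧ InvA (seq ++ [k]) rem' i := by
  obtain ⟨hi3, hlast2, h1s, h2s, hseqlt, hrem, hcomp, hpw⟩ := hinv
  obtain ⟨pre, post, hre, hre', hpre, hkf⟩ := scanA_eq_some hs
  have hkrem : k ∈ rem := by rw [hre]; simp
  obtain ⟨hk3, hki, hkns⟩ := hrem k hkrem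
  have hpw' := hre ▸ hpw
  have hcross : ∀ a ∈ pre, ∀ b ∈ k :: post, a < b := (List.pairwise_append.mp hpw').2.2
  have hkpost : ∀ b ∈ post, k < b :=
    fun b hb => (List.pairwise_cons.mp (List.pairwise_append.mp hpw').2.1).1 b hb
  have hkgcd : Int.gcd k (seq.getLastD 0) ≠ 1 := by
    intro h
    rw [← coprime_iff_gcd k _ (by omega) (by omega)] at h
    rw [h] at hkf; cases hkf
  have hmin : ∀ m : Int, 2 ≤ m → m < k → (m ∈ seq ∨ Int.gcd m (seq.getLastD 0) = 1) := by
    intro m hm2 hmk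
    by_cases hms : m ∈ seq
    · exact Or.inl hms
    · right
      have hm3 : 3 ≤ m := by
        rcases eq_or_lt_of_le hm2 with rfl | h
        · exact absurd h2s hms
        · omega
      have hmrem : m ∈ rem := hcomp m hm3 (by omega) hms
      have hmpre : m ∈ pre := by
        rw [hre] at hmrem
        rcases List.mem_append.mp hmrem with h | h
        · exact h
        · rcases List.mem_cons.mp h with rfl | h
          · omega
          · have := hkpost m h; omega
      rw [← coprime_iff_gcd m _ (by omega) (by omega)]
      exact hpre m hmpre
  refine ⟨⟨by omega, hkns, hkgcd, hmin⟩, ?_⟩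
  have hremsub : ∀ m, m ∈ rem' → m ∈ rem ∧ m ≠ k := by
    intro m hm
    rw [hre'] at hm
    rcases List.mem_append.mp hm with h | h
    · exact ⟨by rw [hre]; exact List.mem_append_left _ h, by have := hcross m h k (by simp); omega⟩
    · exact ⟨by rw [hre]; exact List.mem_append_right _ (List.mem_cons_of_mem _ h),
        by have := hkpost m h; omega⟩
  refine ⟨hi3, ?_, List.mem_append_left _ h1s, List.mem_append_left _ h2s, ?_, ?_, ?_, ?_⟩
  · rw [List.getLastD_concat]; omega
  · intro m hm
    rcases List.mem_append.mp hm with h | h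
    · exact hseqlt m h
    · simp at h; omega
  · intro m hm
    obtain ⟨hmr, hmk⟩ := hremsub m hm
    obtain ⟨a, b, c⟩ := hrem m hmr
    refine ⟨a, b, ?_⟩
    intro hmem
    rcases List.mem_append.mp hmem with h | h
    · exact c h
    · simp at h; omega
  · intro m hm3 hmi hmns
    have hm1 : m ∉ seq := fun h => hmns (List.mem_append_left _ h)
    have hm2 : m ≠ k := fun h => hmns (by rw [h]; simp)
    have : m ∈ rem := hcomp m hm3 hmi hm1
    rw [hre] at this
    rw [hre']
    rcases List.mem_append.mp this with h | h
    · exact List.mem_append_left _ h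
    · rcases List.mem_cons.mp h with rfl | h
      · omega
      · exact List.mem_append_right _ h
  · rw [hre']
    rw [List.pairwise_append]
    refine ⟨(List.pairwise_append.mp hpw').1,
      (List.pairwise_cons.mp (List.pairwise_append.mp hpw').2.1).2, ?_⟩
    intro a ha b hb
    exact hcross a ha b (List.mem_cons_of_mem _ hb)

theorem stepExtend {seq rem : List Int} {i : Int}
    (hinv : InvA seq rem i) (hs : scanA (seq.getLastD 0) rem = none) :
    IsNext seq (seq.getLastD 0) (extendA (seq.getLastD 0) rem i ((seq.getLastD 0).natAbs + 1)).2 ∧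
    InvA (seq ++ [(extendA (seq.getLastD 0) rem i ((seq.getLastD 0).natAbs + 1)).2])
      (extendA (seq.getLastD 0) rem i ((seq.getLastD 0).natAbs + 1)).1
      ((extendA (seq.getLastD 0) rem i ((seq.getLastD 0).natAbs + 1)).2 + 1) := by
  obtain ⟨hi3, hlast2, h1s, h2s, hseqlt, hrem, hcomp, hpw⟩ := hinv
  obtain ⟨j, hij, hjle, hjg, hjmin⟩ := exists_first_noncoprime (seq.getLastD 0) i hlast2
  have hcj : coprime j (seq.getLastD 0) = false := by
    by_contra h
    simp only [Bool.not_eq_false] at h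
    exact hjg ((coprime_iff_gcd j _ (by omega) (by omega)).mp h)
  obtain ⟨L, he, hmL, hpL⟩ := extendA_spec ((seq.getLastD 0).natAbs + 1) i rem hij
    (fun t ht1 ht2 => (coprime_iff_gcd t _ (by omega) (by omega)).mpr (hjmin t ht1 ht2))
    hcj (by omega)
  rw [he]
  have hjns : j ∉ seq := fun h => by have := hseqlt j h; omega
  constructor
  · refine ⟨by omega, hjns, hjg, ?_⟩
    intro m hm2 hmj
    by_cases hms : m ∈ seq
    · exact Or.inl hms
    · right
      by_cases hmi : m < i
      · have hm3 : 3 ≤ m := by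
          rcases eq_or_lt_of_le hm2 with rfl | h
          · exact absurd h2s hms
          · omega
        have := scanA_eq_none hs m (hcomp m hm3 hmi hms)
        exact (coprime_iff_gcd m _ (by omega) (by omega)).mp this
      · exact hjmin m (by omega) hmj
  · refine ⟨by omega, by rw [List.getLastD_concat]; omega,
      List.mem_append_left _ h1s, List.mem_append_left _ h2s, ?_, ?_, ?_, ?_⟩
    · intro m hm
      rcases List.mem_append.mp hm with h | h
      · have := hseqlt m h; omega
      · simp at h; omega
    · intro m hm
      rcases List.mem_append.mp hm with h | h
      · obtain ⟨a, b, c⟩ := hrem m h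
        refine ⟨a, by omega, ?_⟩
        intro hmem
        rcases List.mem_append.mp hmem with h' | h'
        · exact c h'
        · simp at h'; omega
      · obtain ⟨a, b⟩ := (hmL m).mp h
        refine ⟨by omega, by omega, ?_⟩
        intro hmem
        rcases List.mem_append.mp hmem with h' | h'
        · have := hseqlt m h'; omega
        · simp at h'; omega
    · intro m hm3 hmj1 hmns
      have hm1 : m ∉ seq := fun h => hmns (List.mem_append_left _ h)
      have hm2 : m ≠ j := fun h => hmns (by rw [h]; simp)
      by_cases hmi : m < i
      · exact List.mem_append_left _ (hcomp m hm3 hmi hm1)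
      · exact List.mem_append_right _ ((hmL m).mpr ⟨by omega, by omega⟩)
    · rw [List.pairwise_append]
      refine ⟨hpw, hpL, ?_⟩
      intro a ha b hb
      have h1 := (hrem a ha).2.1
      have h2 := ((hmL b).mp hb).1
      omega

theorem stepB {seq rem : List Int} {i last idx : Int} {used : List Int} {t : Int}
    (hrel : RelAB seq rem i last idx used) (hnext : IsNext seq last t) :
    scanB used last 2 ((last * (PySem.Set.len used + 1)).natAbs) = t := by
  obtain ⟨hinv, hl, hlen, hnd, hmem⟩ := hrel
  have hlast2 : 2 ≤ last := hl ▸ hinv.2.1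
  obtain ⟨ht2, htns, htg, hmin⟩ := hnext
  obtain ⟨x, hx2, hxle, hxnu, hxg⟩ := exists_unused_multiple used hnd last hlast2
  have htx : t ≤ x := by
    by_contra hcon
    rcases hmin x hx2 (by omega) with h | h
    · exact hxnu ((hmem x).mpr h)
    · exact hxg h
  have hB : (2 : Int) ≤ last * ((used.length : Int) + 1) := by nlinarith [(Nat.cast_nonneg used.length : (0:Int) ≤ (used.length : Int))]
  have hlenu : PySem.Set.len used = (used.length : Int) := by
    simp [PySem.Set.len]
  apply scanB_eq
  · omega
  · intro jj h2j hjt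
    simp only [Bool.or_eq_true, beq_iff_eq]
    rcases hmin jj h2j hjt with h | h
    · exact Or.inl ((PySem.Set.contains_iff _ _).mpr ((hmem jj).mpr h))
    · right
      rw [pyEuclid_eq_gcd last.natAbs last rfl (by omega) jj (by omega), h]; rfl
  · simp only [Bool.or_eq_false_iff, beq_eq_false_iff_ne]
    constructor
    · by_contra h
      simp only [Bool.not_eq_false] at h
      exact htns ((hmem t).mp ((PySem.Set.contains_iff _ _).mp h))
    · rw [pyEuclid_eq_gcd last.natAbs last rfl (by omega) t (by omega)]
      intro h
      exact htg (by exact_mod_cast h)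
  · rw [hlenu]
    omega

theorem lockstep : ∀ (f : Nat) (n : Int) (seq rem : List Int) (i last idx : Int)
    (used : List Int), RelAB seq rem i last idx used →
    loopA n seq rem i f = loopB n last idx used f := by
  intro f
  induction f with
  | zero => intro n seq rem i last idx used _; rfl
  | succ f ih =>
    intro n seq rem i last idx used hrel
    obtain ⟨hinv, hl, hlen, hnd, hmem⟩ := hrel
    rw [loopA, loopB]
    by_cases hn : last = n
    · rw [hl, if_neg (by omega), if_neg (by omega)]
      omega
    · rw [hl, if_pos hn, if_pos hn]
      cases hs : scanA last rem with
      | some p =>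
        obtain ⟨k, rem'⟩ := p
        obtain ⟨hnext, hinv'⟩ := stepFound hinv (by rw [hl]; exact hs)
        rw [hl] at hnext
        have hk := stepB ⟨hinv, hl, hlen, hnd, hmem⟩ hnext
        show loopA n (seq ++ [k]) rem' i f =
          loopB n (scanB used last 2 ((last * (PySem.Set.len used + 1)).natAbs)) (idx + 1)
            (PySem.Set.add used (scanB used last 2 ((last * (PySem.Set.len used + 1)).natAbs))) f
        rw [hk]
        apply ih
        refine ⟨hinv', List.getLastD_concat, by simp; omega, ?_, ?_⟩
        · have hknu : k ∉ used := fun h => hnext.2.1 ((hmem k).mp h)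
          rw [PySem.Set.add_of_not_mem hknu]
          exact List.Nodup.append hnd (List.nodup_singleton k)
            (by intro a ha hb; simp at hb; subst hb; exact hknu ha)
        · intro m
          rw [PySem.Set.mem_add, List.mem_append, hmem, List.mem_singleton]
      | none =>
        obtain ⟨hnext, hinv'⟩ := stepExtend hinv (by rw [hl]; exact hs)
        rw [hl] at hnext hinv'
        have hk := stepB ⟨hinv, hl, hlen, hnd, hmem⟩ hnext
        show loopA n (seq ++ [(extendA last rem i (last.natAbs + 1)).2])
            (extendA last rem i (last.natAbs + 1)).1
            ((extendA last rem i (last.natAbs + 1)).2 + 1) f =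
          loopB n (scanB used last 2 ((last * (PySem.Set.len used + 1)).natAbs)) (idx + 1)
            (PySem.Set.add used (scanB used last 2 ((last * (PySem.Set.len used + 1)).natAbs))) f
        rw [hk]
        apply ih
        refine ⟨hinv', List.getLastD_concat, by simp; omega, ?_, ?_⟩
        · have hknu : _ ∉ used := fun h => hnext.2.1 ((hmem _).mp h)
          rw [PySem.Set.add_of_not_mem hknu]
          exact List.Nodup.append hnd (List.nodup_singleton _)
            (by intro a ha hb; simp at hb; subst hb; exact hknu ha)
        · intro m
          rw [PySem.Set.mem_add, List.mem_append, hmem, List.mem_singleton]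

theorem relAB_init : RelAB [1, 2] [] 3 2 1 (PySem.Set.ofList [1, 2]) := by
  have hof : PySem.Set.ofList [(1 : Int), 2] = [1, 2] := by decide
  rw [RelAB, hof]
  exact ⟨⟨by omega, by simp, by simp, by simp, by decide, by simp,
    by intro m h1 h2 _; omega, by simp⟩, by simp, by simp, by decide, fun m => Iff.rfl⟩

-- ===== VERDICT (by name: the statement is the Claim_ definition above) =====
theorem ecg_seq_index_spec : Claim_equal_ecg_seq_index := by
  intro n _
  unfold Spec_ecg_seq_index ecg_seq_index ecg_seq_index_alt
  exact lockstep 4294967296 n [1, 2] [] 3 2 1 (PySem.Set.ofList [1, 2]) relAB_init
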